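-- pv_equiv track=rewrite | github.com/neskk/PoGo-Proxies | proxytools/crazyxor.py | decode_crazyxor
-- ===== SOURCE A (Python) =====
-- def decode_crazyxor(dictionary, code):
--     if code.isdigit():
--         return code
--     value = dictionary.get(code, False)
--     if value and value.isdigit():
--         return value
--     elif '^' in code:
--         l_value, r_value = code.split('^', 1)
--         answer = str(int(decode_crazyxor(dictionary, l_value)) ^
--                      int(decode_crazyxor(dictionary, r_value)))
--         return answer
-- ===== SOURCE B (Python) =====
-- def _xor_leaf(dictionary, s):
--     if s.isdigit():
--         return s
--     v = dictionary.get(s)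
--     if v and v.isdigit():
--         return v
--     return None
--
--
-- def decode_crazyxor(dictionary, code):
--     acc = 0
--     split = False
--     cur = code
--     while True:
--         leaf = _xor_leaf(dictionary, cur)
--         if leaf is None and '^' in cur:
--             left, cur = cur.split('^', 1)
--             acc ^= int(_xor_leaf(dictionary, left))
--             split = True
--         elif split:
--             return str(acc ^ int(leaf))
--         else:
--             return leaf
-- ===== Notes on version B (the rewrite author's own statement) =====
-- stated objective: alternative
-- what changed: A's recursive descent (which re-encodes each intermediate XOR as str(int^int) and re-parses it one level up) is replaced by a single flat while-loop over the '^'-chain that keeps a running integer XOR accumulator and a did-split flag, returning the raw leaf string when no split occurred.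
import Mathlib
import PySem

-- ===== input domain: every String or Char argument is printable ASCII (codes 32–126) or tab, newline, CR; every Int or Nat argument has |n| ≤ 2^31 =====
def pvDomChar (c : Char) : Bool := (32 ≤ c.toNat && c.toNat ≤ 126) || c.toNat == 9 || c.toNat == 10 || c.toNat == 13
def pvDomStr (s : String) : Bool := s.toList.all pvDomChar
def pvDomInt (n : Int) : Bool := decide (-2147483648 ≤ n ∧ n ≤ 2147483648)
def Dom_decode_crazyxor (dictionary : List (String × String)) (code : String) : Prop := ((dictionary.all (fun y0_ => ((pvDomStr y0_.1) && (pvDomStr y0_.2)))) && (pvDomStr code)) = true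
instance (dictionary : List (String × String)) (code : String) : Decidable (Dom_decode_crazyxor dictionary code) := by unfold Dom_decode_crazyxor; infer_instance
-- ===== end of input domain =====

-- B replaces A's recursive descent (which re-encodes str(int^int) at every level) by a single
-- left-to-right loop over the '^'-chain with a running XOR accumulator; same return value everywhere A returns.


-- Hand port of Python's int(s), used by BOTH ports. It is transcribed verbatim from
-- PySem.Int.ofChars?'s printed definition (exact); it is re-stated locally only because the
-- prelude's parsing loop is a private definition the equivalence proof could not unfold.
def pvGo : List Char → Bool → Nat → Option Nat
  | [], afterDigit, acc => if afterDigit = true then some acc else none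
  | c :: rest, afterDigit, acc =>
    if c.isDigit = true then pvGo rest true (acc * 10 + (c.toNat - '0'.toNat))
    else
      if c = '_' ∧ afterDigit = true then
        match rest with
        | d :: _tail => if d.isDigit = true then pvGo rest false acc else none
        | [] => none
      else none

def pvDigitsVal : List Char → Option Nat
  | [] => none
  | cs => pvGo cs false 0

def pvOfChars? (s : List Char) : Option Int :=
  match (List.dropWhile PySem.Int.isIntSpace (List.dropWhile PySem.Int.isIntSpace s).reverse).reverse with
  | '-' :: ds => Option.map (fun n => -n) do let a ← pvDigitsVal ds; pure ↑a
  | '+' :: ds => Option.map (fun n => n) do let a ← pvDigitsVal ds; pure ↑a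
  | ds => Option.map (fun n => n) do let a ← pvDigitsVal ds; pure ↑a

-- termination facts for the split on the first '^' (cited by the ports' decreasing_by)
theorem pvTakeWhile_lt (cs : List Char) (h : '^' ∈ cs) :
    (cs.takeWhile (· ≠ '^')).length < cs.length := by
  rcases Nat.lt_or_ge (cs.takeWhile (· ≠ '^')).length cs.length with h1 | h1
  · exact h1
  · exfalso
    have hle := (List.takeWhile_prefix (l := cs) (p := (· ≠ '^'))).length_le
    have heq : cs.takeWhile (· ≠ '^') = cs :=
      (List.takeWhile_prefix _).eq_of_length (Nat.le_antisymm hle h1)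
    have := (List.takeWhile_eq_self_iff).1 heq '^' h
    simp at this

theorem pvDropWhile_lt (cs : List Char) (h : '^' ∈ cs) :
    ((cs.dropWhile (· ≠ '^')).drop 1).length < cs.length := by
  have hne : cs.dropWhile (· ≠ '^') ≠ [] := by
    intro hnil
    have := (List.dropWhile_eq_nil_iff).1 hnil '^' h
    simp at this
  have h1 : 0 < (cs.dropWhile (· ≠ '^')).length := List.length_pos_iff.2 hne
  have h2 : (cs.dropWhile (· ≠ '^')).length ≤ cs.length := List.length_dropWhile_le _ _
  simp only [List.length_drop]
  omega

-- ===== PORT A =====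
-- literal port of decode_crazyxor; the recursion runs over List Char ('^'-split on the first
-- '^' is hand-ported with takeWhile/dropWhile: exact for the single-character separator).
def decodeAux (d : PySem.Dict String String) (cs : List Char) : Option (List Char) :=
  if PySem.Chars.strIsdigit cs then some cs
  else
    -- elif '^' in code: l, r = code.split('^', 1); str(int(decode(l)) ^ int(decode(r)))
    let caret : Option (List Char) :=
      if h : '^' ∈ cs then
        let l := cs.takeWhile (· ≠ '^')
        let r := (cs.dropWhile (· ≠ '^')).drop 1
        match decodeAux d l with
        | none => none                      -- int(None): TypeError
        | some ls =>
          match pvOfChars? ls with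
          | none => none                    -- int(s): ValueError
          | some a =>
            match decodeAux d r with
            | none => none                  -- int(None): TypeError
            | some rs =>
              match pvOfChars? rs with
              | none => none                -- int(s): ValueError
              | some b => some (PySem.Int.toChars (PySem.Int.bxor a b))
      else none                             -- implicit 'return None'
    match PySem.Dict.get? d (String.mk cs) with
    | some v => if !v.toList.isEmpty && PySem.Chars.strIsdigit v.toList then some v.toList else caret
    | none => caret
termination_by cs.length
decreasing_by
  · exact pvTakeWhile_lt cs h
  · exact pvDropWhile_lt cs h

def decode_crazyxor (dictionary : List (String × String)) (code : String) : Option String :=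
  (decodeAux (PySem.Dict.ofList dictionary) code.toList).map String.mk

-- ===== PORT B =====
-- port of Source B: _xor_leaf plus the flat while-loop with the running XOR accumulator.
def xorLeaf (d : PySem.Dict String String) (cs : List Char) : Option (List Char) :=
  if PySem.Chars.strIsdigit cs then some cs
  else
    match PySem.Dict.get? d (String.mk cs) with
    | some v => if !v.toList.isEmpty && PySem.Chars.strIsdigit v.toList then some v.toList else none
    | none => none

def xorLoop (d : PySem.Dict String String) (cs : List Char) (acc : Int) (split : Bool) :
    Option (List Char) :=
  if h : xorLeaf d cs = none ∧ '^' ∈ cs then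
    -- left, cur = cur.split('^', 1); acc ^= int(_xor_leaf(dictionary, left))
    match xorLeaf d (cs.takeWhile (· ≠ '^')) with
    | none => none                          -- int(None): TypeError
    | some ls =>
      match pvOfChars? ls with
      | none => none                        -- int(s): ValueError
      | some a => xorLoop d ((cs.dropWhile (· ≠ '^')).drop 1) (PySem.Int.bxor acc a) true
  else if split then
    -- return str(acc ^ int(leaf))
    match xorLeaf d cs with
    | none => none                          -- int(None): TypeError
    | some l =>
      match pvOfChars? l with
      | none => none
      | some b => some (PySem.Int.toChars (PySem.Int.bxor acc b))
  else xorLeaf d cs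
termination_by cs.length
decreasing_by exact pvDropWhile_lt cs h.2

def decode_crazyxor_alt (dictionary : List (String × String)) (code : String) : Option String :=
  (xorLoop (PySem.Dict.ofList dictionary) code.toList 0 false).map String.mk

-- ===== PRECONDITION & SPEC =====
-- Pre_ excludes exactly the inputs on which A raises TypeError (int(None) on an unresolved
-- leaf after at least one '^'-split); it admits every input on which A returns.
def pvLeafOK (dictionary : List (String × String)) (cs : List Char) : Bool :=
  PySem.Chars.strIsdigit cs ||
    (match PySem.Dict.get? (PySem.Dict.ofList dictionary) (String.mk cs) with
     | some v => !v.toList.isEmpty && PySem.Chars.strIsdigit v.toList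
     | none => false)

def Pre_decode_crazyxor (dictionary : List (String × String)) (code : String) : Prop :=
  pvLeafOK dictionary code.toList = true ∨ ¬ ('^' ∈ code.toList) ∨
    (∃ i < (code.toList.splitOn '^').length,
      pvLeafOK dictionary (List.intercalate ['^'] ((code.toList.splitOn '^').drop i)) = true ∧
      ∀ p ∈ (code.toList.splitOn '^').take i, pvLeafOK dictionary p = true)
instance (dictionary : List (String × String)) (code : String) : Decidable (Pre_decode_crazyxor dictionary code) := by unfold Pre_decode_crazyxor; infer_instance

def pvWitness_decode_crazyxor : (List (String × String)) × String := ([("a", "1")], "a^2")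

def Spec_decode_crazyxor (dictionary : List (String × String)) (code : String) (out : Option String) : Prop := out = decode_crazyxor_alt dictionary code
instance (dictionary : List (String × String)) (code : String) (out : Option String) : Decidable (Spec_decode_crazyxor dictionary code out) := by unfold Spec_decode_crazyxor; infer_instance

-- ===== CLAIM (what is proved, stated in full; the proofs are below) =====
def Claim_equal_decode_crazyxor : Prop := ∀ (dictionary : List (String × String)) (code : String), Dom_decode_crazyxor dictionary code → Pre_decode_crazyxor dictionary code → Spec_decode_crazyxor dictionary code (decode_crazyxor dictionary code)

-- ===== LEMMAS AND PROOFS =====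

-- facts about digit characters and the hand-ported int()
theorem pv_isdigit_eq (c : Char) : PySem.Chars.isdigit c = c.isDigit := by
  simp only [PySem.Chars.isdigit, Char.isDigit, Char.le_def]

theorem pv_space_of_digit (c : Char) (h : c.isDigit = true) : PySem.Int.isIntSpace c = false := by
  have hs : c ≠ ' ' ∧ c ≠ '\t' ∧ c ≠ '\n' ∧ c ≠ '\x0d' ∧ c ≠ '\x0b' ∧ c ≠ '\x0c' := by
    refine ⟨?_,?_,?_,?_,?_,?_⟩ <;> rintro rfl <;> exact absurd h (by decide)
  obtain ⟨h1,h2,h3,h4,h5,h6⟩ := hs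
  simp [PySem.Int.isIntSpace, h1,h2,h3,h4,h5,h6]

theorem pv_dropWhile_digits (l : List Char) (h : ∀ c ∈ l, c.isDigit = true) :
    l.dropWhile PySem.Int.isIntSpace = l := by
  cases l with
  | nil => rfl
  | cons c tl =>
    rw [List.dropWhile_cons]
    simp [pv_space_of_digit c (h c (by simp))]

def pvVal (ds : List Char) : Nat := ds.foldl (fun a c => a * 10 + (c.toNat - '0'.toNat)) 0

theorem pv_go_digits (l : List Char) (h : ∀ c ∈ l, c.isDigit = true) :
    ∀ acc, pvGo l true acc = some (l.foldl (fun a c => a * 10 + (c.toNat - '0'.toNat)) acc) := by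
  induction l with
  | nil => intro acc; rfl
  | cons c tl ih =>
    intro acc
    have hc := h c (by simp)
    simp only [pvGo, hc, if_true, List.foldl_cons]
    exact ih (fun x hx => h x (by simp [hx])) _

theorem pv_parse_digits (ds : List Char) (hne : ds ≠ []) (h : ∀ c ∈ ds, c.isDigit = true) :
    pvOfChars? ds = some ((pvVal ds : Nat) : Int) := by
  obtain ⟨c, tl, rfl⟩ := List.exists_cons_of_ne_nil hne
  have hc := h c (by simp)
  have hall : ∀ x ∈ (c :: tl).reverse, x.isDigit = true := by
    intro x hx; simp at hx; exact h x (by simp; tauto)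
  unfold pvOfChars?
  rw [pv_dropWhile_digits _ h, pv_dropWhile_digits _ hall, List.reverse_reverse]
  have hm : c ≠ '-' := by rintro rfl; exact absurd hc (by decide)
  have hp : c ≠ '+' := by rintro rfl; exact absurd hc (by decide)
  split
  next ds' heq => exact absurd (List.cons.injEq .. ▸ heq).1 hm
  next ds' heq => exact absurd (List.cons.injEq .. ▸ heq).1 hp
  next =>
    have htl : ∀ x ∈ tl, x.isDigit = true := fun x hx => h x (by simp [hx])
    have h1 : pvDigitsVal (c :: tl) = pvGo (c :: tl) false 0 := rfl
    rw [h1]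
    simp only [pvGo, hc, if_true]
    rw [pv_go_digits tl htl]
    simp [pvVal]

theorem pv_digitChar_toNat (d : Nat) (h : d < 10) : (Nat.digitChar d).toNat = 48 + d := by
  interval_cases d <;> decide

theorem pv_fold_toDigits (m : Nat) : ∀ acc : Nat,
    (Nat.toDigits 10 m).foldl (fun a c => a * 10 + (c.toNat - '0'.toNat)) acc
      = acc * 10 ^ (Nat.toDigits 10 m).length + m := by
  induction m using Nat.strong_induction_on with
  | _ m ih =>
    intro acc
    rw [Nat.toDigits_eq_if (by norm_num)]
    have h48 : '0'.toNat = 48 := rfl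
    by_cases hm : m < 10
    · simp [hm, pv_digitChar_toNat m hm, h48]
    · simp only [hm, if_false]
      rw [List.foldl_append]
      have hlt : m / 10 < m := Nat.div_lt_self (by omega) (by norm_num)
      rw [ih _ hlt acc]
      simp only [pv_digitChar_toNat (m % 10) (Nat.mod_lt _ (by norm_num)), List.foldl_cons,
        List.foldl_nil, List.length_append, List.length_cons, List.length_nil, h48]
      have := Nat.div_add_mod m 10
      ring_nf
      omega

-- int(str(n)) = n for the nonnegative results both programs produce
theorem pv_rt (m : Nat) : pvOfChars? (PySem.Int.toChars (m : Int)) = some ((m : Nat) : Int) := by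
  have hneg : ¬ ((m : Int) < 0) := by omega
  have htc : PySem.Int.toChars (m : Int) = Nat.toDigits 10 m := by
    simp [PySem.Int.toChars, hneg]
  rw [htc]
  have hne : Nat.toDigits 10 m ≠ [] := List.ne_nil_of_length_pos Nat.length_toDigits_pos
  have hdig : ∀ c ∈ Nat.toDigits 10 m, c.isDigit = true :=
    fun c hc => Nat.isDigit_of_mem_toDigits (by norm_num) (by norm_num) hc
  rw [pv_parse_digits _ hne hdig]
  have h0 := pv_fold_toDigits m 0
  simp only [Nat.zero_mul, Nat.zero_add] at h0
  simp only [pvVal, h0]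

theorem pv_strIsdigit_unpack (ls : List Char) (h : PySem.Chars.strIsdigit ls = true) :
    ls ≠ [] ∧ ∀ c ∈ ls, c.isDigit = true := by
  simp [PySem.Chars.strIsdigit] at h
  refine ⟨by simpa using h.1, fun c hc => ?_⟩
  rw [← pv_isdigit_eq]
  exact h.2 c hc

theorem pv_parse_isdigit (ls : List Char) (h : PySem.Chars.strIsdigit ls = true) :
    pvOfChars? ls = some ((pvVal ls : Nat) : Int) := by
  obtain ⟨h1, h2⟩ := pv_strIsdigit_unpack ls h
  exact pv_parse_digits ls h1 h2

-- every string xorLeaf returns is a digit string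
theorem pv_leaf_digit (d : PySem.Dict String String) (cs ls : List Char)
    (h : xorLeaf d cs = some ls) : PySem.Chars.strIsdigit ls = true := by
  by_cases hdig : PySem.Chars.strIsdigit cs
  · obtain rfl : cs = ls := by simpa [xorLeaf, hdig] using h
    exact hdig
  · cases hget : PySem.Dict.get? d (String.mk cs) with
    | none => simp [xorLeaf, hdig, hget] at h
    | some v =>
      by_cases hv : (!v.toList.isEmpty && PySem.Chars.strIsdigit v.toList) = true
      · obtain rfl : v.toList = ls := by simpa [xorLeaf, hdig, hget, hv] using h
        exact (Bool.and_eq_true_iff.mp hv).2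
      · simp [xorLeaf, hdig, hget, hv] at h

-- unfolding equations relating the two ports' case structure
theorem pv_decodeAux_leaf (d : PySem.Dict String String) (cs lf : List Char)
    (h : xorLeaf d cs = some lf) : decodeAux d cs = some lf := by
  by_cases hdig : PySem.Chars.strIsdigit cs
  · obtain rfl : cs = lf := by simpa [xorLeaf, hdig] using h
    simp [decodeAux, hdig]
  · cases hget : PySem.Dict.get? d (String.mk cs) with
    | none => simp [xorLeaf, hdig, hget] at h
    | some v =>
      by_cases hv : (!v.toList.isEmpty && PySem.Chars.strIsdigit v.toList) = true
      · obtain rfl : v.toList = lf := by simpa [xorLeaf, hdig, hget, hv] using h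
        simp [decodeAux, hdig, hget, hv]
      · simp [xorLeaf, hdig, hget, hv] at h

theorem pv_noCaret (d : PySem.Dict String String) (cs : List Char) (hc : ¬ '^' ∈ cs) :
    decodeAux d cs = xorLeaf d cs := by
  by_cases hdig : PySem.Chars.strIsdigit cs
  · simp [decodeAux, xorLeaf, hdig]
  · cases hget : PySem.Dict.get? d (String.mk cs) with
    | none => simp [decodeAux, xorLeaf, hdig, hget, hc]
    | some v =>
      by_cases hv : (!v.toList.isEmpty && PySem.Chars.strIsdigit v.toList) = true
      · simp [decodeAux, xorLeaf, hdig, hget, hv]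
      · simp [decodeAux, xorLeaf, hdig, hget, hv, hc]

theorem pv_decodeAux_none (d : PySem.Dict String String) (cs : List Char)
    (h : xorLeaf d cs = none) (hc : ¬ '^' ∈ cs) : decodeAux d cs = none := by
  rw [pv_noCaret d cs hc]; exact h

theorem pv_decodeAux_caret (d : PySem.Dict String String) (cs : List Char)
    (h : xorLeaf d cs = none) (hc : '^' ∈ cs) :
    decodeAux d cs =
      (match xorLeaf d (cs.takeWhile (· ≠ '^')) with
       | none => none
       | some ls =>
         match pvOfChars? ls with
         | none => none
         | some a =>
           match decodeAux d ((cs.dropWhile (· ≠ '^')).drop 1) with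
           | none => none
           | some rs =>
             match pvOfChars? rs with
             | none => none
             | some b => some (PySem.Int.toChars (PySem.Int.bxor a b))) := by
  have hl : ¬ '^' ∈ cs.takeWhile (· ≠ '^') := by
    intro hmem
    have := List.mem_takeWhile_imp hmem
    simp at this
  rw [← pv_noCaret d _ hl]
  by_cases hdig : PySem.Chars.strIsdigit cs
  · simp [xorLeaf, hdig] at h
  · cases hget : PySem.Dict.get? d (String.mk cs) with
    | none =>
      rw [decodeAux]
      simp only [hdig, Bool.false_eq_true, if_false, hget, hc, dif_pos, List.drop_one]
    | some v =>
      by_cases hv : (!v.toList.isEmpty && PySem.Chars.strIsdigit v.toList) = true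
      · simp [xorLeaf, hdig, hget, hv] at h
      · rw [decodeAux]
        simp only [hdig, Bool.false_eq_true, if_false, hget, hv, hc, dif_pos, List.drop_one]

theorem pv_xorLoop_leaf (d : PySem.Dict String String) (cs lf : List Char) (acc : Int) (split : Bool)
    (h : xorLeaf d cs = some lf) :
    xorLoop d cs acc split =
      if split then
        (match pvOfChars? lf with
         | none => none
         | some b => some (PySem.Int.toChars (PySem.Int.bxor acc b)))
      else some lf := by
  unfold xorLoop
  simp [h]

theorem pv_xorLoop_none (d : PySem.Dict String String) (cs : List Char) (acc : Int) (split : Bool)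
    (h : xorLeaf d cs = none) (hc : ¬ '^' ∈ cs) : xorLoop d cs acc split = none := by
  unfold xorLoop
  simp [h, hc]

theorem pv_xorLoop_caret (d : PySem.Dict String String) (cs : List Char) (acc : Int) (split : Bool)
    (h : xorLeaf d cs = none) (hc : '^' ∈ cs) :
    xorLoop d cs acc split =
      (match xorLeaf d (cs.takeWhile (· ≠ '^')) with
       | none => none
       | some ls =>
         match pvOfChars? ls with
         | none => none
         | some a => xorLoop d ((cs.dropWhile (· ≠ '^')).drop 1) (PySem.Int.bxor acc a) true) := by
  rw [xorLoop]
  rw [dif_pos ⟨h, hc⟩]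

theorem pv_bxor_zero_nat (m : Nat) : PySem.Int.bxor 0 (m : Int) = (m : Int) := by
  rw [show (0 : Int) = ((0 : Nat) : Int) by simp, PySem.Int.bxor_natCast]
  simp

-- the main invariant: the flat loop with running accumulator computes A's recursive value
theorem pv_main (d : PySem.Dict String String) :
    ∀ n, ∀ cs : List Char, cs.length = n →
      ((∀ ls, decodeAux d cs = some ls → ∃ m : Nat, pvOfChars? ls = some ((m : Nat) : Int)) ∧
       (∀ acc : Nat, xorLoop d cs ((acc : Nat) : Int) true =
          match decodeAux d cs with
          | none => none
          | some ls =>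
            match pvOfChars? ls with
            | none => none
            | some b => some (PySem.Int.toChars (PySem.Int.bxor ((acc : Nat) : Int) b)))) := by
  intro n
  induction n using Nat.strong_induction_on with
  | _ n ih =>
    intro cs hlen
    cases hleaf : xorLeaf d cs with
    | some lf =>
      have hd := pv_decodeAux_leaf d cs lf hleaf
      have hdig := pv_leaf_digit d cs lf hleaf
      obtain ⟨m, hm⟩ : ∃ m : Nat, pvOfChars? lf = some ((m : Nat) : Int) :=
        ⟨pvVal lf, pv_parse_isdigit lf hdig⟩
      constructor
      · intro ls hls
        rw [hd] at hls
        obtain rfl : lf = ls := by simpa using hls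
        exact ⟨m, hm⟩
      · intro acc
        rw [pv_xorLoop_leaf d cs lf _ true hleaf, hd]
        rfl
    | none =>
      by_cases hc : '^' ∈ cs
      · -- split on the first '^'
        have hrlt : ((cs.dropWhile (· ≠ '^')).drop 1).length < n := hlen ▸ pvDropWhile_lt cs hc
        have ihr := ih _ hrlt ((cs.dropWhile (· ≠ '^')).drop 1) rfl
        have hdeq := pv_decodeAux_caret d cs hleaf hc
        constructor
        · intro ls hls
          rw [hdeq] at hls
          cases hll : xorLeaf d (cs.takeWhile (· ≠ '^')) with
          | none => simp only [hll] at hls; exact absurd hls (by simp)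
          | some ls' =>
            simp only [hll] at hls
            obtain ⟨ma, hma⟩ : ∃ m : Nat, pvOfChars? ls' = some ((m : Nat) : Int) :=
              ⟨pvVal ls', pv_parse_isdigit ls' (pv_leaf_digit d _ ls' hll)⟩
            simp only [hma] at hls
            cases hr : decodeAux d ((cs.dropWhile (· ≠ '^')).drop 1) with
            | none => simp only [hr] at hls; exact absurd hls (by simp)
            | some rs =>
              simp only [hr] at hls
              obtain ⟨mb, hmb⟩ := ihr.1 rs hr
              simp only [hmb] at hls
              obtain rfl : PySem.Int.toChars (PySem.Int.bxor ((ma : Nat) : Int) ((mb : Nat) : Int)) = ls := by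
                simpa using hls
              refine ⟨ma ^^^ mb, ?_⟩
              rw [PySem.Int.bxor_natCast]
              exact pv_rt (ma ^^^ mb)
        · intro acc
          rw [pv_xorLoop_caret d cs _ true hleaf hc, hdeq]
          cases hll : xorLeaf d (cs.takeWhile (· ≠ '^')) with
          | none => rfl
          | some ls' =>
            obtain ⟨ma, hma⟩ : ∃ m : Nat, pvOfChars? ls' = some ((m : Nat) : Int) :=
              ⟨pvVal ls', pv_parse_isdigit ls' (pv_leaf_digit d _ ls' hll)⟩
            simp only [hma, PySem.Int.bxor_natCast]
            rw [ihr.2 (acc ^^^ ma)]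
            cases hr : decodeAux d ((cs.dropWhile (· ≠ '^')).drop 1) with
            | none => rfl
            | some rs =>
              obtain ⟨mb, hmb⟩ := ihr.1 rs hr
              simp only [hmb, PySem.Int.bxor_natCast, pv_rt (ma ^^^ mb), Nat.xor_assoc]
      · constructor
        · intro ls hls
          rw [pv_decodeAux_none d cs hleaf hc] at hls
          exact absurd hls (by simp)
        · intro acc
          rw [pv_xorLoop_none d cs _ true hleaf hc, pv_decodeAux_none d cs hleaf hc]

theorem pv_top (d : PySem.Dict String String) (cs : List Char) :
    xorLoop d cs 0 false = decodeAux d cs := by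
  cases hleaf : xorLeaf d cs with
  | some lf =>
    rw [pv_xorLoop_leaf d cs lf 0 false hleaf, pv_decodeAux_leaf d cs lf hleaf]
    rfl
  | none =>
    by_cases hc : '^' ∈ cs
    · rw [pv_xorLoop_caret d cs 0 false hleaf hc, pv_decodeAux_caret d cs hleaf hc]
      cases hll : xorLeaf d (cs.takeWhile (· ≠ '^')) with
      | none => rfl
      | some ls' =>
        obtain ⟨ma, hma⟩ : ∃ m : Nat, pvOfChars? ls' = some ((m : Nat) : Int) :=
          ⟨pvVal ls', pv_parse_isdigit ls' (pv_leaf_digit d _ ls' hll)⟩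
        simp only [hma, pv_bxor_zero_nat ma]
        rw [(pv_main d _ _ rfl).2 ma]
    · rw [pv_xorLoop_none d cs 0 false hleaf hc, pv_decodeAux_none d cs hleaf hc]

-- ===== VERDICT (by name: the statement is the Claim_ definition above) =====
theorem decode_crazyxor_spec : Claim_equal_decode_crazyxor := by
  intro dictionary code _ _
  unfold Spec_decode_crazyxor decode_crazyxor decode_crazyxor_alt
  rw [pv_top]
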